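-- pv_equiv track=rewrite | github.com/jonahansmulcrone/Data233FinalProject | Sentence_quality.py | countWor
-- ===== SOURCE A (Python) =====
-- def countWor(lis):
--     word_counts = {}
--     sum = 0
--     # Iterate over each string in the list
--     for string in lis:
--         # Split the string into words
--         words = string.split()
--         # Iterate over each word in the list
--         for word in words:
--             # Update the count for the word in the dictionary
--             word_counts[word] = word_counts.get(word, 0) + 1
--
--     # Print the word counts
--     for word, count in word_counts.items():
--         if count > 2:
--             sum = sum + count
--     return sum
-- ===== SOURCE B (Python) =====
-- def countWor(lis):
--     # Sort-then-scan: flatten all words, sort them, run-length scan over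
--     # the sorted list; add each run length that exceeds 2. No dict needed.
--     words = sorted(w for s in lis for w in s.split())
--     total = 0
--     i = 0
--     n = len(words)
--     while i < n:
--         j = i + 1
--         while j < n and words[j] == words[i]:
--             j += 1
--         if j - i > 2:
--             total += j - i
--         i = j
--     return total
-- ===== Notes on version B (the rewrite author's own statement) =====
-- stated objective: alternative
-- what changed: Replaces the hash frequency table (dict of counts, then a sum over its items > 2) by sort-then-scan: flatten all words, sort them, and run-length scan the sorted list, adding each run length that exceeds 2.
import Mathlib
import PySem

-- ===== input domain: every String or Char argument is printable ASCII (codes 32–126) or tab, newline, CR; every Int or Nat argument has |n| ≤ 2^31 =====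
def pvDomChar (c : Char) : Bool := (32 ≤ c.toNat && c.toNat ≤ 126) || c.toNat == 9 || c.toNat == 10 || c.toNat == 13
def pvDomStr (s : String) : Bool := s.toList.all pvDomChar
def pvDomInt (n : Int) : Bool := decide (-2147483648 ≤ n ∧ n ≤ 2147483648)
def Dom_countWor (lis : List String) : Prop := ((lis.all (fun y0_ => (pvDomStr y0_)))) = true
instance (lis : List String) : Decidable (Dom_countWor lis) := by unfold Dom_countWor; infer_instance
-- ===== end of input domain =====

-- B replaces A's frequency dict by sort-then-scan over the flattened word list (alternative algorithm, not claimed faster).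

-- ===== PORT A =====
-- dict of counts built by nested loops, then sum the counts > 2 over the items
def countWor (lis : List String) : Int :=
  let word_counts : PySem.Dict String Int :=
    lis.foldl (fun d s =>
      (PySem.Str.split₀ s).foldl (fun d w => d.insert w (d.getD w 0 + 1)) d)
      PySem.Dict.empty
  word_counts.items.foldl (fun sum wc => if wc.2 > 2 then sum + wc.2 else sum) 0

-- ===== PORT B =====
-- the two nested `while` loops of Source B: take each run of equal words off the
-- front of the (sorted) list, add its length when it exceeds 2
def scanRuns : List String → Int
  | [] => 0
  | x :: xs =>
      (if (xs.takeWhile (fun y => y == x)).length + 1 > 2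
        then ((xs.takeWhile (fun y => y == x)).length + 1 : Int) else 0)
      + scanRuns (xs.dropWhile (fun y => y == x))
  termination_by l => l.length
  decreasing_by
    exact Nat.lt_succ_of_le (List.length_dropWhile_le _ _)

-- flatten all words, sort them, run-length scan over the sorted list
def countWor_alt (lis : List String) : Int :=
  let words := PySem.List.sorted (lis.flatMap (fun s => PySem.Str.split₀ s)) (fun w => w) false
  scanRuns words

-- ===== PRECONDITION & SPEC =====
def Spec_countWor (lis : List String) (out : Int) : Prop := out = countWor_alt lis
instance (lis : List String) (out : Int) : Decidable (Spec_countWor lis out) := by unfold Spec_countWor; infer_instance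

-- ===== CLAIM (what is proved, stated in full; the proofs are below) =====
def Claim_equal_countWor : Prop := ∀ (lis : List String), Dom_countWor lis → Spec_countWor lis (countWor lis)

-- ===== LEMMAS AND PROOFS =====

-- nested loop over the list of strings = single loop over the flattened word list
theorem pv_foldl_flatMap {α β γ : Type} (f : α → List β) (g : γ → β → γ) :
    ∀ (L : List α) (init : γ),
      L.foldl (fun d s => (f s).foldl g d) init = (L.flatMap f).foldl g init := by
  intro L
  induction L with
  | nil => intro init; rfl
  | cons x xs ih =>
    intro init
    simp [List.flatMap_cons, List.foldl_append, ih]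

-- a conditional accumulating fold is init + the sum of the mapped list
theorem pv_foldl_if_add {α : Type} (P : α → Prop) [DecidablePred P] (g : α → Int) :
    ∀ (l : List α) (init : Int),
      l.foldl (fun acc x => if P x then acc + g x else acc) init
        = init + (l.map (fun x => if P x then g x else 0)).sum := by
  intro l
  induction l with
  | nil => intro init; simp
  | cons x xs ih =>
    intro init
    by_cases h : P x
    · simp [h, ih]; ring
    · simp [h, ih]

-- in a ≤-sorted list whose elements all dominate x, x does not survive dropWhile (== x)
theorem pv_not_mem_dropWhile_beq (x : String) :
    ∀ (xs : List String), (∀ y ∈ xs, x ≤ y) → xs.Pairwise (· ≤ ·) →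
      x ∉ xs.dropWhile (fun y => y == x) := by
  intro xs
  induction xs with
  | nil => intro _ _ h; simp at h
  | cons y t ih =>
    intro hlo hpair
    by_cases h : (y == x) = true
    · rw [List.dropWhile_cons, if_pos h]
      exact ih (fun z hz => hlo z (List.mem_cons_of_mem y hz)) (List.pairwise_cons.mp hpair).2
    · rw [List.dropWhile_cons, if_neg h]
      intro hmem
      have hyx : y ≠ x := fun he => h (by simp [he])
      have hxy : x < y := lt_of_le_of_ne (hlo y List.mem_cons_self) (Ne.symm hyx)
      rcases List.mem_cons.mp hmem with he | hmem'
      · exact hyx he.symm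
      · exact absurd ((List.pairwise_cons.mp hpair).1 x hmem') (not_le.mpr hxy)

-- the run-length scan of a ≤-sorted list sums, over its distinct words,
-- the multiplicities that exceed 2
theorem pv_scanRuns_sorted :
    ∀ (n : Nat) (l : List String), l.length ≤ n → l.Pairwise (· ≤ ·) →
      scanRuns l
        = ((PySem.Set.ofList l).map
            (fun k => if l.count k > 2 then (l.count k : Int) else 0)).sum := by
  intro n
  induction n with
  | zero =>
    intro l hlen _
    have : l = [] := List.eq_nil_of_length_eq_zero (Nat.le_zero.mp hlen)
    subst this; simp [scanRuns]
  | succ m ih =>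
    intro l hlen hs
    match l with
    | [] => simp [scanRuns]
    | x :: xs =>
      have hx : ∀ y ∈ xs, x ≤ y := (List.pairwise_cons.mp hs).1
      have hxs : xs.Pairwise (· ≤ ·) := (List.pairwise_cons.mp hs).2
      rw [scanRuns]
      set run := xs.takeWhile (fun y => y == x) with hrun
      set rest := xs.dropWhile (fun y => y == x) with hrest
      have hsplit : run ++ rest = xs := List.takeWhile_append_dropWhile
      have hrun_eq : ∀ y ∈ run, y = x := by
        intro y hy
        rw [hrun] at hy
        exact eq_of_beq (List.mem_takeWhile_imp (p := fun y => y == x) (l := xs) hy)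
      have hx_rest : x ∉ rest := hrest ▸ pv_not_mem_dropWhile_beq x xs hx hxs
      -- rest is sorted and short enough for the induction hypothesis
      have hrest_pair : rest.Pairwise (· ≤ ·) :=
        hxs.sublist (hrest ▸ List.dropWhile_sublist _)
      have hrest_len : rest.length ≤ m := by
        have h1 : rest.length ≤ xs.length := hrest ▸ List.length_dropWhile_le _ _
        have h2 : xs.length + 1 ≤ m + 1 := by simpa using hlen
        omega
      -- multiplicities
      have hcount_x : (x :: xs).count x = run.length + 1 := by
        rw [List.count_cons_self, ← hsplit, List.count_append]
        rw [List.count_eq_length.mpr (fun b hb => (hrun_eq b hb).symm)]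
        rw [List.count_eq_zero.mpr hx_rest]
      have hcount_ne : ∀ k, k ≠ x → (x :: xs).count k = rest.count k := by
        intro k hk
        rw [← hsplit]
        simp [List.count_cons, List.count_append,
              List.count_eq_zero.mpr (fun hmem => hk (hrun_eq k hmem))]
        exact fun he => hk he.symm
      -- the distinct words of l are x together with those of rest
      have hperm : List.Perm (PySem.Set.ofList (x :: xs)) (x :: PySem.Set.ofList rest) := by
        refine (List.perm_ext_iff_of_nodup (PySem.Set.nodup_ofList _) ?_).mpr ?_
        · exact List.nodup_cons.mpr
            ⟨fun h => hx_rest ((PySem.Set.mem_ofList _ _).mp h), PySem.Set.nodup_ofList _⟩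
        · intro a
          simp only [PySem.Set.mem_ofList, List.mem_cons]
          constructor
          · rintro (h | h)
            · exact Or.inl h
            · rw [← hsplit] at h
              rcases List.mem_append.mp h with h | h
              · exact Or.inl (hrun_eq a h)
              · exact Or.inr h
          · rintro (h | h)
            · exact Or.inl h
            · refine Or.inr ?_
              rw [← hsplit]
              exact List.mem_append_right _ h
      -- assemble
      rw [ih rest hrest_len hrest_pair]
      rw [(hperm.map _).sum_eq, List.map_cons, List.sum_cons, hcount_x]
      refine congrArg₂ (· + ·) ?_ ?_
      · push_cast; ring_nf
      · refine (congrArg List.sum (List.map_congr_left ?_)).symm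
        intro k hk
        have hk_rest : k ∈ rest := (PySem.Set.mem_ofList _ _).mp hk
        have hk_ne : k ≠ x := fun h => hx_rest (h ▸ hk_rest)
        rw [hcount_ne k hk_ne]

theorem countWor_spec' (lis : List String) : countWor lis = countWor_alt lis := by
  simp only [countWor, countWor_alt]
  rw [pv_foldl_flatMap]
  set words := lis.flatMap (fun s => PySem.Str.split₀ s) with hw
  set sw := PySem.List.sorted words (fun w => w) false with hsw
  -- A side: dict = Counter(words); its items are the distinct words with their counts
  rw [PySem.Dict.foldl_insert_getD_add_one_eq_counter, PySem.Dict.items_counter]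
  rw [List.foldl_map]
  show List.foldl (fun acc k => if (words.count k : Int) > 2 then acc + (words.count k : Int) else acc) 0
      (PySem.Set.ofList words) = _
  rw [pv_foldl_if_add (fun k => (words.count k : Int) > 2) (fun k => (words.count k : Int))]
  simp only [zero_add]
  -- normalise the Int-valued conditional
  have hif : ∀ k : String,
      (if (words.count k : Int) > 2 then (words.count k : Int) else 0)
        = (if words.count k > 2 then (words.count k : Int) else 0) := by
    intro k
    by_cases h : words.count k > 2
    · rw [if_pos h, if_pos (by exact_mod_cast h)]
    · rw [if_neg h, if_neg (by exact_mod_cast h)]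
  rw [List.map_congr_left (fun k _ => hif k)]
  -- B side: the run-length scan of the sorted list is the same sum
  have hsort_pair : sw.Pairwise (· ≤ ·) := by
    have := PySem.List.sorted_pairwise (xs := words) (key := fun w => w)
    simpa using this
  rw [pv_scanRuns_sorted sw.length sw (le_refl _) hsort_pair]
  have hperm_words : List.Perm sw words := hsw ▸ PySem.List.sorted_perm words _ _
  have hofperm : List.Perm (PySem.Set.ofList sw) (PySem.Set.ofList words) := by
    refine (List.perm_ext_iff_of_nodup (PySem.Set.nodup_ofList _) (PySem.Set.nodup_ofList _)).mpr ?_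
    intro a
    simp only [PySem.Set.mem_ofList]
    exact ⟨fun h => hperm_words.mem_iff.mp h, fun h => hperm_words.mem_iff.mpr h⟩
  have h1 : ∀ k ∈ PySem.Set.ofList sw,
      (if sw.count k > 2 then (sw.count k : Int) else 0)
        = (if words.count k > 2 then (words.count k : Int) else 0) := by
    intro k _
    rw [hperm_words.count_eq]
  rw [List.map_congr_left h1]
  exact ((hofperm.map _).sum_eq).symm

-- ===== VERDICT (by name: the statement is the Claim_ definition above) =====
theorem countWor_spec : Claim_equal_countWor := by
  intro lis _hdom
  unfold Spec_countWor
  exact countWor_spec' lis
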